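-- pv_equiv track=rewrite | github.com/halc8312/ESP | routes/main.py | _normalize_manual_image_urls
-- ===== SOURCE A (Python) =====
-- def _normalize_manual_image_urls(raw_value):
--     normalized_urls = []
--     seen_urls = set()
--     candidates = (raw_value or "").replace("\r", "\n").replace("|", "\n").split("\n")
--
--     for candidate in candidates:
--         url = candidate.strip()
--         if not url:
--             continue
--         lower_url = url.lower()
--         if not (
--             lower_url.startswith("http://")
--             or lower_url.startswith("https://")
--             or url.startswith("/")
--         ):
--             continue
--         if url in seen_urls:
--             continue
--         normalized_urls.append(url)
--         seen_urls.add(url)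
--
--     return normalized_urls
-- ===== SOURCE B (Python) =====
-- def _normalize_manual_image_urls(raw_value):
--     candidates = (raw_value or "").replace("\r", "\n").replace("|", "\n").split("\n")
--     result = []
--     for candidate in reversed(candidates):
--         url = candidate.strip()
--         if url and (url.lower().startswith("http://")
--                     or url.lower().startswith("https://")
--                     or url.startswith("/")):
--             result = [url] + [u for u in result if u != url]
--     return result
-- ===== Notes on version B (the rewrite author's own statement) =====
-- stated objective: alternative
-- what changed: Traverses the candidates back-to-front with no seen-set: each valid URL is prepended and any later duplicate of it is deleted from the partial result, so first-occurrence order emerges from suffix rebuilding instead of a seen-set guard.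
import Mathlib
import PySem

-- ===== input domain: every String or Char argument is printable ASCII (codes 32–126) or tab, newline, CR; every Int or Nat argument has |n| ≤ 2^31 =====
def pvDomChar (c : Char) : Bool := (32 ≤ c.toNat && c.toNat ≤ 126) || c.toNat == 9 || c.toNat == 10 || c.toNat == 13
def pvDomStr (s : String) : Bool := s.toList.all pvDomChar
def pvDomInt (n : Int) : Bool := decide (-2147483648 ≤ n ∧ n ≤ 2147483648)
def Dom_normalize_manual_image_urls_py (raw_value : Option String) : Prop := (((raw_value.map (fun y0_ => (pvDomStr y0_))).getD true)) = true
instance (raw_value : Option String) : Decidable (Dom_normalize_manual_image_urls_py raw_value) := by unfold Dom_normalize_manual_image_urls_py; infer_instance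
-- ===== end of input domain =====

-- B replaces A's forward loop with a seen-set by a back-to-front traversal that prepends each
-- valid URL and deletes its later duplicates from the partial result; objective: alternative.

-- ===== PORT A =====
-- A's loop body (one candidate): strip, skip empties, skip non-URLs, skip already-seen, else append+record.
def pvStepA (st : List String × PySem.Set String) (candidate : String) : List String × PySem.Set String :=
  let url := PySem.Str.strip candidate
  if url = "" then st
  else
    let lower_url := PySem.Str.lower url
    if !(PySem.Str.startswith lower_url "http://"
         || PySem.Str.startswith lower_url "https://"
         || PySem.Str.startswith url "/") then st
    else if PySem.Set.contains st.2 url then st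
    else (st.1 ++ [url], PySem.Set.add st.2 url)

-- candidates = (raw_value or "").replace("\r","\n").replace("|","\n").split("\n");
-- '.split' with nonempty separator never raises: split? is always 'some' here.
def pvCandidates (raw_value : Option String) : List String :=
  (PySem.Str.split?
    (PySem.Str.replace (PySem.Str.replace (raw_value.getD "") "\r" "\n") "|" "\n") "\n").getD []

def normalize_manual_image_urls_py (raw_value : Option String) : List String :=
  ((pvCandidates raw_value).foldl pvStepA ([], PySem.Set.empty)).1

-- ===== PORT B =====
-- Source B's combined branch condition: nonempty and http/https/'/'-rooted.
def pvValid (u : String) : Bool :=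
  u ≠ "" && (PySem.Str.startswith (PySem.Str.lower u) "http://"
             || PySem.Str.startswith (PySem.Str.lower u) "https://"
             || PySem.Str.startswith u "/")

-- Source B's loop body over reversed(candidates): result = [url] + [u for u in result if u != url].
def pvStepB (result : List String) (candidate : String) : List String :=
  let url := PySem.Str.strip candidate
  if pvValid url then url :: result.filter (fun u => u ≠ url) else result

def normalize_manual_image_urls_py_alt (raw_value : Option String) : List String :=
  (pvCandidates raw_value).reverse.foldl pvStepB []

-- ===== PRECONDITION & SPEC =====
def Spec_normalize_manual_image_urls_py (raw_value : Option String) (out : List String) : Prop := out = normalize_manual_image_urls_py_alt raw_value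
instance (raw_value : Option String) (out : List String) : Decidable (Spec_normalize_manual_image_urls_py raw_value out) := by unfold Spec_normalize_manual_image_urls_py; infer_instance

-- ===== CLAIM (what is proved, stated in full; the proofs are below) =====
def Claim_equal_normalize_manual_image_urls_py : Prop := ∀ (raw_value : Option String), Dom_normalize_manual_image_urls_py raw_value → Spec_normalize_manual_image_urls_py raw_value (normalize_manual_image_urls_py raw_value)

-- ===== LEMMAS AND PROOFS =====

-- On a diagonal state (acc = seen), A's step keeps the diagonal and acts as Set.add guarded by pvValid.
theorem pvStepA_diag (s : PySem.Set String) (c : String) :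
    pvStepA (s, s) c =
      (if pvValid (PySem.Str.strip c) then PySem.Set.add s (PySem.Str.strip c) else s,
       if pvValid (PySem.Str.strip c) then PySem.Set.add s (PySem.Str.strip c) else s) := by
  unfold pvStepA pvValid
  by_cases h0 : PySem.Str.strip c = ""
  · simp [h0]
  · cases hb : (PySem.Str.startswith (PySem.Str.lower (PySem.Str.strip c)) "http://"
         || PySem.Str.startswith (PySem.Str.lower (PySem.Str.strip c)) "https://"
         || PySem.Str.startswith (PySem.Str.strip c) "/") with
    | false => simp_all
    | true =>
      by_cases h2 : PySem.Str.strip c ∈ s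
      · simp_all [PySem.Set.add, PySem.Set.contains]
      · simp_all [PySem.Set.add, PySem.Set.contains]
        intro ha hbb
        rcases hb with (h | h) | h
        · rw [h] at ha; exact absurd ha (by simp)
        · rw [h] at hbb; exact absurd hbb (by simp)
        · exact h

-- A's loop, started on a diagonal state, is the fold of Set.add over the filtered stripped list.
theorem pv_loopA_eq (cs : List String) (s : PySem.Set String) :
    cs.foldl pvStepA (s, s) =
      (((cs.map PySem.Str.strip).filter pvValid).foldl PySem.Set.add s,
       ((cs.map PySem.Str.strip).filter pvValid).foldl PySem.Set.add s) := by
  induction cs generalizing s with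
  | nil => rfl
  | cons c cs ih =>
    rw [List.foldl_cons, pvStepA_diag, List.map_cons, List.filter_cons]
    cases hok : pvValid (PySem.Str.strip c) <;>
      simp only [if_true, if_false, Bool.false_eq_true, List.foldl_cons] <;> exact ih _

-- B's backwards fold is the foldr of "prepend and delete duplicates" over the filtered stripped list.
theorem pv_loopB_eq (cs : List String) :
    cs.reverse.foldl pvStepB [] =
      ((cs.map PySem.Str.strip).filter pvValid).foldr
        (fun url r => url :: r.filter (fun u => u ≠ url)) [] := by
  induction cs with
  | nil => rfl
  | cons c cs ih =>
    rw [List.reverse_cons, List.foldl_append, List.map_cons, List.filter_cons]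
    cases hok : pvValid (PySem.Str.strip c) <;>
      simp only [List.foldl_cons, List.foldl_nil, pvStepB, hok, if_true, if_false,
        Bool.false_eq_true, List.foldr_cons, ih]

-- "Prepend and delete later duplicates", folded from the right, is first-occurrence dedup (Set.ofList).
theorem pv_foldr_eq_ofList (L : List String) :
    L.foldr (fun url r => url :: r.filter (fun u => u ≠ url)) [] = PySem.Set.ofList L := by
  induction L with
  | nil => rfl
  | cons x L ih =>
    rw [List.foldr_cons, ih, PySem.Set.ofList_cons]
    simp only [PySem.Set.discard]
    exact congrArg (x :: ·) (List.filter_congr (fun y _ => by simp [beq_eq_decide]))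

-- ===== VERDICT (by name: the statement is the Claim_ definition above) =====
theorem normalize_manual_image_urls_py_spec : Claim_equal_normalize_manual_image_urls_py := by
  intro raw_value _
  unfold Spec_normalize_manual_image_urls_py normalize_manual_image_urls_py normalize_manual_image_urls_py_alt
  rw [pv_loopB_eq, pv_foldr_eq_ofList, PySem.Set.ofList_eq_foldl,
    show (([], PySem.Set.empty) : List String × PySem.Set String) = (PySem.Set.empty, PySem.Set.empty) from rfl,
    pv_loopA_eq,
    show (PySem.Set.empty : PySem.Set String) = [] from rfl]
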